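-- pv_equiv track=rewrite | github.com/robertobalestri/SEMAMORPH_Semantic_and_Morphological_Cataloging_of_TV_Series | backend/src/utils/character_entities_utils.py | extract_surname_from_appellation
-- ===== SOURCE A (Python) =====
-- TITLES = [
--     "Dr", "Dr.", "Mr", "Mr.", "Ms", "Ms.", "Miss", "Miss.", "Mrs", "Mrs.",
--     "Mme", "Mme.", "Prof", "Prof.", "Doc", "Doctor", "Sir", "Lady", "Dame",
--     "Duke", "Duchess", "Count", "Countess", "Baron", "Baroness", "King",
--     "Queen", "Prince", "Princess", "Earl", "Don", "Sister", "Brother",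
--     "Colonel", "Major", "Captain", "Lieutenant", "Sergeant", "Private",
--     "Doctorate", "PhD", "MD", "MA", "BA", "BS", "BSc", "Bachelor", "Master",
--     "Masters", "M.A.", "M.B.A.", "M.D.", "M.S.", "M.Sc.", "Chief", "Judge",
--     "Father", "Mother", "Pastor", "Reverend", "Rev", "Rev.", "Senator",
--     "Representative", "President", "Vice President", "Governor", "Mayor",
--     "General", "Admiral", "Commander", "Sheriff", "Detective", "Officer",
--     "Agent", "Inspector", "Constable", "Nurse", "Paramedic", "EMT",
--     "Intern", "Resident", "Attending", "Fellow", "Chaplain", "Coach"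
-- ]
--
-- def extract_surname_from_appellation(appellation: str) -> str:
--     """
--     Extract surname from an appellation, handling titles.
--
--     Args:
--         appellation: The appellation to process
--
--     Returns:
--         The extracted surname or empty string
--     """
--     if not appellation:
--         return ""
--
--     words = appellation.strip().split()
--
--     # Filter out titles
--     filtered_words = []
--     for word in words:
--         clean_word = word.rstrip('.,!?;:')
--         if clean_word not in TITLES:
--             filtered_words.append(word)
--
--     # Return the last word as surname if we have multiple words
--     if len(filtered_words) > 1:
--         return filtered_words[-1].rstrip('.,!?;:')
--     elif len(filtered_words) == 1:
--         return filtered_words[0].rstrip('.,!?;:')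
--
--     return ""
-- ===== SOURCE B (Python) =====
-- TITLES = [
--     "Dr", "Dr.", "Mr", "Mr.", "Ms", "Ms.", "Miss", "Miss.", "Mrs", "Mrs.",
--     "Mme", "Mme.", "Prof", "Prof.", "Doc", "Doctor", "Sir", "Lady", "Dame",
--     "Duke", "Duchess", "Count", "Countess", "Baron", "Baroness", "King",
--     "Queen", "Prince", "Princess", "Earl", "Don", "Sister", "Brother",
--     "Colonel", "Major", "Captain", "Lieutenant", "Sergeant", "Private",
--     "Doctorate", "PhD", "MD", "MA", "BA", "BS", "BSc", "Bachelor", "Master",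
--     "Masters", "M.A.", "M.B.A.", "M.D.", "M.S.", "M.Sc.", "Chief", "Judge",
--     "Father", "Mother", "Pastor", "Reverend", "Rev", "Rev.", "Senator",
--     "Representative", "President", "Vice President", "Governor", "Mayor",
--     "General", "Admiral", "Commander", "Sheriff", "Detective", "Officer",
--     "Agent", "Inspector", "Constable", "Nurse", "Paramedic", "EMT",
--     "Intern", "Resident", "Attending", "Fellow", "Chaplain", "Coach"
-- ]
--
-- _TITLES = frozenset(TITLES)
--
--
-- def extract_surname_from_appellation(appellation: str) -> str:
--     """Character-level backward scan: walk the reversed string word by word and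
--     return the first cleaned word (trailing '.,!?;:' removed) that is not a title."""
--     rev = appellation[::-1]
--     while rev:
--         if rev[0].isspace():
--             rev = rev[1:]
--             continue
--         k = 0
--         while k < len(rev) and not rev[k].isspace():
--             k += 1
--         clean = rev[:k].lstrip('.,!?;:')[::-1]
--         if clean not in _TITLES:
--             return clean
--         rev = rev[k:]
--     return ""
-- ===== Notes on version B (the rewrite author's own statement) =====
-- stated objective: alternative
-- what changed: Replaces A's strip/split, forward accumulation of a filtered word list and [-1]/[0] indexing with a character-level backward scan of the reversed string that extracts one word at a time and returns the first cleaned word that is not a title, materialising no word list.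
import Mathlib
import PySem

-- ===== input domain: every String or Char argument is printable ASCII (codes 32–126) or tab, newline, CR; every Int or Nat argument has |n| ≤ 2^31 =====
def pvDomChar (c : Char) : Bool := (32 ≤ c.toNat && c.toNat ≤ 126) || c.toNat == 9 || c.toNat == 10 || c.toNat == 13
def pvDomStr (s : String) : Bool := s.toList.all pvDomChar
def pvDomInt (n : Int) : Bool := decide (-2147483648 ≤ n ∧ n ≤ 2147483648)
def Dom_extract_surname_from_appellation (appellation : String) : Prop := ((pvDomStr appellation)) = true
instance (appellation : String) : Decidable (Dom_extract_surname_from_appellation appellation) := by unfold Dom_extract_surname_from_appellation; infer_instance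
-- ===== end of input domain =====

-- B replaces A's split-then-accumulate-a-filtered-list-then-index-[-1] with a
-- character-level backward scan over the reversed string that returns the first
-- non-title word it meets (objective: alternative — no word list is materialised).

-- ===== PORT A =====
def pvTitles : List String := [
  "Dr", "Dr.", "Mr", "Mr.", "Ms", "Ms.", "Miss", "Miss.", "Mrs", "Mrs.",
  "Mme", "Mme.", "Prof", "Prof.", "Doc", "Doctor", "Sir", "Lady", "Dame",
  "Duke", "Duchess", "Count", "Countess", "Baron", "Baroness", "King",
  "Queen", "Prince", "Princess", "Earl", "Don", "Sister", "Brother",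
  "Colonel", "Major", "Captain", "Lieutenant", "Sergeant", "Private",
  "Doctorate", "PhD", "MD", "MA", "BA", "BS", "BSc", "Bachelor", "Master",
  "Masters", "M.A.", "M.B.A.", "M.D.", "M.S.", "M.Sc.", "Chief", "Judge",
  "Father", "Mother", "Pastor", "Reverend", "Rev", "Rev.", "Senator",
  "Representative", "President", "Vice President", "Governor", "Mayor",
  "General", "Admiral", "Commander", "Sheriff", "Detective", "Officer",
  "Agent", "Inspector", "Constable", "Nurse", "Paramedic", "EMT",
  "Intern", "Resident", "Attending", "Fellow", "Chaplain", "Coach"]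

-- word.rstrip('.,!?;:') ported by hand (PySem has no rstrip-with-chars): exact —
-- drop the trailing run of these six chars.
def pvRstripPunct (w : String) : String :=
  String.ofList ((w.toList.reverse.dropWhile (fun c => c ∈ ['.', ',', '!', '?', ';', ':'])).reverse)

def extract_surname_from_appellation (appellation : String) : String :=
  if appellation = "" then ""
  else
    let words := PySem.Str.split₀ (PySem.Str.strip appellation)
    let filtered_words := words.foldl
      (fun acc word => if (pvRstripPunct word ∈ pvTitles : Bool) = true then acc else acc ++ [word]) []
    if filtered_words.length > 1 then pvRstripPunct (PySem.List.pyGetD filtered_words (-1) "")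
    else if filtered_words.length = 1 then pvRstripPunct (PySem.List.pyGetD filtered_words 0 "")
    else ""

-- ===== PORT B =====
-- Source B's `.lstrip('.,!?;:')` membership test
def pvPunct (c : Char) : Bool := c ∈ ['.', ',', '!', '?', ';', ':']

-- Source B's while-loop over the reversed string `rev`, as structural recursion:
-- a whitespace head char is skipped; otherwise the next word is the maximal run
-- of non-whitespace chars (rev[:k]); its punctuation is lstripped, it is reversed
-- back and returned unless it is a title, in which case the scan continues after
-- the word (rev[k:]).
def pvScan : List Char → String
  | [] => ""
  | c :: rest =>
    if PySem.Chars.isspace c then pvScan rest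
    else
      let clean := String.ofList
        ((((c :: rest).takeWhile (fun d => !PySem.Chars.isspace d)).dropWhile pvPunct).reverse)
      if clean ∈ pvTitles then pvScan ((c :: rest).dropWhile (fun d => !PySem.Chars.isspace d))
      else clean
termination_by l => l.length
decreasing_by
  · simp only [List.length_cons]
    omega
  · rename_i hsp _
    rw [List.dropWhile_cons_of_pos (by simp [hsp])]
    simp only [List.length_cons]
    exact Nat.lt_succ_of_le (List.length_dropWhile_le _ _)

def extract_surname_from_appellation_alt (appellation : String) : String :=
  pvScan appellation.toList.reverse

-- ===== PRECONDITION & SPEC =====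
def Spec_extract_surname_from_appellation (appellation : String) (out : String) : Prop := out = extract_surname_from_appellation_alt appellation
instance (appellation : String) (out : String) : Decidable (Spec_extract_surname_from_appellation appellation out) := by unfold Spec_extract_surname_from_appellation; infer_instance

-- ===== CLAIM (what is proved, stated in full; the proofs are below) =====
def Claim_equal_extract_surname_from_appellation : Prop := ∀ (appellation : String), Dom_extract_surname_from_appellation appellation → Spec_extract_surname_from_appellation appellation (extract_surname_from_appellation appellation)

-- ===== LEMMAS AND PROOFS =====

-- A recursive characterisation of PySem.Chars.split₀ (go-accumulator lemmas, the
-- three unfolding equations), invariance of split₀ under strip / trailing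
-- whitespace, a word-recursion induction principle, and the reversal law
-- "split₀ of the reversed string = reversed words in reversed order".

theorem pv_go_acc (s : List Char) : ∀ cur acc,
    PySem.Chars.split₀.go s cur acc = acc.reverse ++ PySem.Chars.split₀.go s cur [] := by
  induction s with
  | nil =>
    intro cur acc
    simp only [PySem.Chars.split₀.go]
    by_cases h : cur = [] <;> simp [h]
  | cons c rest ih =>
    intro cur acc
    simp only [PySem.Chars.split₀.go]
    by_cases hsp : PySem.Chars.isspace c
    · by_cases hc : cur = []
      · simpa [hsp, hc] using ih [] acc
      · simp [hsp, hc, ih [] (cur.reverse :: acc), ih [] [cur.reverse]]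
    · simpa [hsp] using ih (c :: cur) acc

theorem pv_go_word (s : List Char) : ∀ cur, cur ≠ [] →
    PySem.Chars.split₀.go s cur [] =
      (cur.reverse ++ s.takeWhile (fun d => !PySem.Chars.isspace d)) ::
        PySem.Chars.split₀ (s.dropWhile (fun d => !PySem.Chars.isspace d)) := by
  induction s with
  | nil =>
    intro cur hcur
    simp [PySem.Chars.split₀.go, PySem.Chars.split₀, hcur]
  | cons c rest ih =>
    intro cur hcur
    by_cases hsp : PySem.Chars.isspace c
    · simp only [PySem.Chars.split₀.go, hsp, if_true]
      rw [if_neg (by simpa using hcur), pv_go_acc]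
      simp [PySem.Chars.split₀, hsp, PySem.Chars.split₀.go]
    · simp only [PySem.Chars.split₀.go, hsp, Bool.false_eq_true, if_false]
      rw [ih (c :: cur) (by simp)]
      simp [hsp]

theorem pv_split0_nil : PySem.Chars.split₀ [] = [] := rfl

theorem pv_split0_cons_space {c : Char} (l : List Char) (h : PySem.Chars.isspace c) :
    PySem.Chars.split₀ (c :: l) = PySem.Chars.split₀ l := by
  simp [PySem.Chars.split₀, PySem.Chars.split₀.go, h]

theorem pv_split0_cons_word {c : Char} (l : List Char) (h : ¬ PySem.Chars.isspace c) :
    PySem.Chars.split₀ (c :: l) =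
      ((c :: l).takeWhile (fun d => !PySem.Chars.isspace d)) ::
        PySem.Chars.split₀ ((c :: l).dropWhile (fun d => !PySem.Chars.isspace d)) := by
  show PySem.Chars.split₀.go (c :: l) [] [] = _
  simp only [PySem.Chars.split₀.go, h, Bool.false_eq_true, if_false]
  rw [pv_go_word l [c] (by simp)]
  simp [h]

theorem pv_go_space_tail {t : List Char} (ht : ∀ c ∈ t, PySem.Chars.isspace c)
    (acc : List (List Char)) : PySem.Chars.split₀.go t [] acc = acc.reverse := by
  induction t generalizing acc with
  | nil => simp [PySem.Chars.split₀.go]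
  | cons c t' ih =>
    have hc : PySem.Chars.isspace c := ht c (by simp)
    simp only [PySem.Chars.split₀.go, hc, if_true, List.isEmpty_nil]
    exact ih (fun d hd => ht d (by simp [hd])) acc

theorem pv_go_append_space {t : List Char} (ht : ∀ c ∈ t, PySem.Chars.isspace c)
    (s : List Char) : ∀ cur acc,
    PySem.Chars.split₀.go (s ++ t) cur acc = PySem.Chars.split₀.go s cur acc := by
  induction s with
  | nil =>
    intro cur acc
    simp only [List.nil_append]
    by_cases hc : cur = []
    · subst hc
      rw [pv_go_space_tail ht acc]
      simp [PySem.Chars.split₀.go]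
    · cases t with
      | nil => rfl
      | cons d t' =>
        have hd : PySem.Chars.isspace d := ht d (by simp)
        simp only [PySem.Chars.split₀.go, hd, if_true]
        rw [pv_go_space_tail (fun e he => ht e (by simp [he])) (cur.reverse :: acc)]
        simp [hc]
  | cons c s' ih =>
    intro cur acc
    simp only [List.cons_append, PySem.Chars.split₀.go]
    by_cases hsp : PySem.Chars.isspace c
    · by_cases hc : cur = [] <;> simp [hsp, hc, ih]
    · simp [hsp, ih]

theorem pv_split0_append_space {t : List Char} (ht : ∀ c ∈ t, PySem.Chars.isspace c)
    (s : List Char) : PySem.Chars.split₀ (s ++ t) = PySem.Chars.split₀ s :=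
  pv_go_append_space ht s [] []

theorem pv_split0_lstrip (l : List Char) :
    PySem.Chars.split₀ (l.dropWhile PySem.Chars.isspace) = PySem.Chars.split₀ l := by
  induction l with
  | nil => rfl
  | cons c l' ih =>
    by_cases hsp : PySem.Chars.isspace c
    · rw [List.dropWhile_cons_of_pos hsp, ih, pv_split0_cons_space l' hsp]
    · rw [List.dropWhile_cons_of_neg (by simp [hsp])]

theorem pv_split0_strip (l : List Char) :
    PySem.Chars.split₀ (PySem.Chars.strip l) = PySem.Chars.split₀ l := by
  have hx : ∀ x : List Char, PySem.Chars.split₀ (PySem.Chars.rstrip x) = PySem.Chars.split₀ x := by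
    intro x
    have hdecomp : PySem.Chars.rstrip x ++ (x.reverse.takeWhile PySem.Chars.isspace).reverse = x := by
      simp only [PySem.Chars.rstrip]
      rw [← List.reverse_append, List.takeWhile_append_dropWhile, List.reverse_reverse]
    conv_rhs => rw [← hdecomp]
    rw [pv_split0_append_space]
    intro c hc
    rw [List.mem_reverse] at hc
    exact List.mem_takeWhile_imp hc
  simp only [PySem.Chars.strip]
  rw [hx]
  simp only [PySem.Chars.lstrip]
  rw [pv_split0_lstrip]

theorem pv_word_induction (motive : List Char → Prop) (h0 : motive [])
    (hstep : ∀ c rest, PySem.Chars.isspace c → motive rest → motive (c :: rest))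
    (hword : ∀ c rest, ¬ PySem.Chars.isspace c →
      motive ((c :: rest).dropWhile (fun d => !PySem.Chars.isspace d)) → motive (c :: rest)) :
    ∀ l, motive l := by
  intro l
  induction hn : l.length using Nat.strong_induction_on generalizing l with
  | _ n ih =>
    cases l with
    | nil => exact h0
    | cons c rest =>
      by_cases hc : PySem.Chars.isspace c
      · exact hstep c rest hc (ih rest.length (by simp [← hn]) rest rfl)
      · refine hword c rest hc (ih _ ?_ _ rfl)
        rw [← hn, List.dropWhile_cons_of_pos (by simp [hc]), List.length_cons]
        exact Nat.lt_succ_of_le (List.length_dropWhile_le _ _)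

theorem pv_dropWhile_head_space (l : List Char) {d : Char} {r : List Char}
    (h : l.dropWhile (fun e => !PySem.Chars.isspace e) = d :: r) :
    PySem.Chars.isspace d := by
  have := List.head?_dropWhile_not (fun e => !PySem.Chars.isspace e) l
  rw [h] at this
  simpa using this

theorem pv_split0_append_word {w : List Char} (hw : w ≠ [])
    (hnw : ∀ c ∈ w, ¬ PySem.Chars.isspace c) :
    ∀ x : List Char, (∀ c, x.getLast? = some c → PySem.Chars.isspace c) →
      PySem.Chars.split₀ (x ++ w) = PySem.Chars.split₀ x ++ [w] := by
  refine pv_word_induction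
    (fun x => (∀ c, x.getLast? = some c → PySem.Chars.isspace c) →
      PySem.Chars.split₀ (x ++ w) = PySem.Chars.split₀ x ++ [w]) ?_ ?_ ?_
  · intro _
    obtain ⟨c, w', rfl⟩ := List.exists_cons_of_ne_nil hw
    rw [List.nil_append, pv_split0_nil, List.nil_append,
      pv_split0_cons_word w' (hnw c (by simp))]
    rw [List.takeWhile_eq_self_iff.mpr (by intro a ha; simp [hnw a ha]),
      List.dropWhile_eq_nil_iff.mpr (by intro a ha; simp [hnw a ha]), pv_split0_nil]
  · intro c rest hc ih hlast
    rw [List.cons_append, pv_split0_cons_space _ hc, pv_split0_cons_space _ hc]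
    apply ih
    intro e he
    cases rest with
    | nil => simp at he
    | cons r rs => exact hlast e (by simpa using he)
  · intro c rest hc ih hlast
    have hxne : (c :: rest : List Char) ≠ [] := by simp
    obtain ⟨e, hge⟩ : ∃ e, (c :: rest).getLast? = some e :=
      ⟨_, List.getLast?_eq_some_getLast hxne⟩
    have hesp : PySem.Chars.isspace e := hlast e hge
    have hmem : e ∈ (c :: rest) := List.mem_of_getLast? hge
    -- takeWhile stops strictly inside c :: rest
    have hnotall : ¬ ((c :: rest).takeWhile (fun d => !PySem.Chars.isspace d)).length
        = (c :: rest).length := by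
      intro hlen
      have heq : (c :: rest).takeWhile (fun d => !PySem.Chars.isspace d) = c :: rest :=
        (List.takeWhile_prefix _).eq_of_length hlen
      have hmem' := hmem
      rw [← heq] at hmem'
      have := List.mem_takeWhile_imp hmem'
      simp [hesp] at this
    have hdropne : (c :: rest).dropWhile (fun d => !PySem.Chars.isspace d) ≠ [] := by
      intro hnil
      have hall := List.dropWhile_eq_nil_iff.mp hnil
      exact hnotall (by rw [List.takeWhile_eq_self_iff.mpr hall])
    have htw : ((c :: rest) ++ w).takeWhile (fun d => !PySem.Chars.isspace d)
        = (c :: rest).takeWhile (fun d => !PySem.Chars.isspace d) := by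
      rw [List.takeWhile_append, if_neg hnotall]
    have hdw : ((c :: rest) ++ w).dropWhile (fun d => !PySem.Chars.isspace d)
        = (c :: rest).dropWhile (fun d => !PySem.Chars.isspace d) ++ w := by
      rw [List.dropWhile_append, if_neg (by simpa using hdropne)]
    have hcons : (c :: rest) ++ w = c :: (rest ++ w) := rfl
    rw [hcons, pv_split0_cons_word _ hc, ← hcons, htw, hdw,
      pv_split0_cons_word rest hc]
    -- apply ih to the dropWhile tail
    rw [ih ?hlast']
    case hlast' =>
      intro e he
      obtain ⟨pre, hpre⟩ := (List.dropWhile_suffix (l := c :: rest)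
        (p := fun d => !PySem.Chars.isspace d))
      rw [← hpre, List.getLast?_append_of_ne_nil pre hdropne] at hlast
      exact hlast e he
    simp

theorem pv_split0_reverse (l : List Char) :
    PySem.Chars.split₀ l.reverse = ((PySem.Chars.split₀ l).map List.reverse).reverse := by
  refine pv_word_induction
    (fun l => PySem.Chars.split₀ l.reverse = ((PySem.Chars.split₀ l).map List.reverse).reverse)
    ?_ ?_ ?_ l
  · rfl
  · intro c rest hc ih
    rw [List.reverse_cons, pv_split0_append_space (by intro e he; simp at he; simp [he, hc]),
      ih, pv_split0_cons_space _ hc]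
  · intro c rest hc ih
    have hw : (c :: rest).takeWhile (fun d => !PySem.Chars.isspace d) ≠ [] := by
      simp [hc]
    have hx : (c :: rest).takeWhile (fun d => !PySem.Chars.isspace d)
        ++ (c :: rest).dropWhile (fun d => !PySem.Chars.isspace d) = c :: rest :=
      List.takeWhile_append_dropWhile
    calc PySem.Chars.split₀ (c :: rest).reverse
        = PySem.Chars.split₀
            (((c :: rest).dropWhile (fun d => !PySem.Chars.isspace d)).reverse ++
             ((c :: rest).takeWhile (fun d => !PySem.Chars.isspace d)).reverse) := by
          rw [← List.reverse_append, hx]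
      _ = PySem.Chars.split₀ (((c :: rest).dropWhile (fun d => !PySem.Chars.isspace d)).reverse)
            ++ [((c :: rest).takeWhile (fun d => !PySem.Chars.isspace d)).reverse] := by
          apply pv_split0_append_word (by simpa using hw)
          · intro e he
            rw [List.mem_reverse] at he
            have := List.mem_takeWhile_imp he
            simpa using this
          · intro e he
            rw [List.getLast?_reverse] at he
            cases hd : (c :: rest).dropWhile (fun d => !PySem.Chars.isspace d) with
            | nil => rw [hd] at he; simp at he
            | cons d r =>
              rw [hd] at he
              simp at he
              exact he ▸ pv_dropWhile_head_space _ hd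
      _ = ((PySem.Chars.split₀ (c :: rest)).map List.reverse).reverse := by
          rw [ih, pv_split0_cons_word _ hc]
          simp

def pvFirstNonTitle : List String → String
  | [] => ""
  | word :: rest =>
    let clean := pvRstripPunct word
    if clean ∈ pvTitles then pvFirstNonTitle rest else clean

def pvF : List (List Char) → String
  | [] => ""
  | w :: t =>
    if String.ofList ((w.dropWhile pvPunct).reverse) ∈ pvTitles then pvF t
    else String.ofList ((w.dropWhile pvPunct).reverse)

theorem pv_scan_eq_F (r : List Char) : pvScan r = pvF (PySem.Chars.split₀ r) := by
  refine pv_word_induction (fun r => pvScan r = pvF (PySem.Chars.split₀ r)) ?_ ?_ ?_ r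
  · show pvScan [] = pvF (PySem.Chars.split₀ [])
    rw [pvScan]
    rfl
  · intro c rest hc ih
    rw [pvScan, if_pos hc, pv_split0_cons_space _ hc, ih]
  · intro c rest hc ih
    rw [pvScan, if_neg hc, pv_split0_cons_word _ hc]
    simp only [pvF]
    by_cases ht : String.ofList
        ((((c :: rest).takeWhile (fun d => !PySem.Chars.isspace d)).dropWhile pvPunct).reverse)
        ∈ pvTitles
    · rw [if_pos ht, if_pos ht, ih]
    · rw [if_neg ht, if_neg ht]

theorem pv_F_map (vs : List (List Char)) :
    pvF (vs.map List.reverse) = pvFirstNonTitle (vs.map String.ofList) := by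
  have hpred : (fun c => (c ∈ ['.', ',', '!', '?', ';', ':'] : Bool)) = pvPunct := rfl
  induction vs with
  | nil => rfl
  | cons v t ih =>
    simp only [List.map_cons, pvF, pvFirstNonTitle]
    have hclean : pvRstripPunct (String.ofList v)
        = String.ofList ((v.reverse.dropWhile pvPunct).reverse) := by
      rw [pvRstripPunct, String.toList_ofList, hpred]
    rw [hclean, ih]

theorem pvFirstNonTitle_eq_filter (rs : List String) :
    pvFirstNonTitle rs =
      match rs.filter (fun w => !(pvRstripPunct w ∈ pvTitles : Bool)) with
      | [] => ""
      | w :: _ => pvRstripPunct w := by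
  induction rs with
  | nil => rfl
  | cons w t ih =>
    simp only [pvFirstNonTitle, List.filter_cons]
    by_cases h : pvRstripPunct w ∈ pvTitles
    · simp [h, ih]
    · simp [h]

theorem pv_core (ws : List String) :
    (let filtered := ws.foldl
        (fun acc word => if (pvRstripPunct word ∈ pvTitles : Bool) = true then acc else acc ++ [word]) [];
      if filtered.length > 1 then pvRstripPunct (PySem.List.pyGetD filtered (-1) "")
      else if filtered.length = 1 then pvRstripPunct (PySem.List.pyGetD filtered 0 "")
      else "") = pvFirstNonTitle ws.reverse := by
  have hfold : ws.foldl
      (fun acc word => if (pvRstripPunct word ∈ pvTitles : Bool) = true then acc else acc ++ [word]) []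
      = ws.filter (fun w => !(pvRstripPunct w ∈ pvTitles : Bool)) := by
    rw [PySem.List.foldl_congr_mem ws _
      (fun acc w => if (!(pvRstripPunct w ∈ pvTitles : Bool)) = true then acc ++ [w] else acc) []
      (by intro acc w _
          by_cases h : (pvRstripPunct w ∈ pvTitles : Bool) = true <;> simp [h])]
    have := PySem.List.foldl_append_if
      (fun w => !(pvRstripPunct w ∈ pvTitles : Bool)) (fun w => w) ws []
    simpa using this
  rw [pvFirstNonTitle_eq_filter, List.filter_reverse, hfold]
  cases hf : ws.filter (fun w => !(pvRstripPunct w ∈ pvTitles : Bool)) with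
  | nil => simp
  | cons w t =>
    have hne : (w :: t) ≠ ([] : List String) := by simp
    have hrevne : (w :: t).reverse ≠ ([] : List String) := by simp
    have hL : (match (w :: t).reverse with
        | [] => ""
        | a :: _ => pvRstripPunct a) = pvRstripPunct ((w :: t).getLast hne) := by
      obtain ⟨a, r, har⟩ := List.exists_cons_of_ne_nil hrevne
      rw [har]
      have ha : a = ((w :: t).reverse).head hrevne := by simp [har]
      rw [ha, List.head_reverse]
    rw [hL]
    cases t with
    | nil => simp [PySem.List.pyGetD_zero_cons]
    | cons w' t' =>
      have hred : (let filtered := w :: w' :: t';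
          if filtered.length > 1 then pvRstripPunct (PySem.List.pyGetD filtered (-1) "")
          else if filtered.length = 1 then pvRstripPunct (PySem.List.pyGetD filtered 0 "") else "")
          = pvRstripPunct (PySem.List.pyGetD (w :: w' :: t') (-1) "") := by
        simp
      rw [hred, PySem.List.pyGetD_neg_one _ _ (by simp)]

-- ===== VERDICT (by name: the statement is the Claim_ definition above) =====
theorem extract_surname_from_appellation_spec : Claim_equal_extract_surname_from_appellation := by
  intro s _
  unfold Spec_extract_surname_from_appellation
  have hB : extract_surname_from_appellation_alt s
      = pvFirstNonTitle (((PySem.Chars.split₀ s.toList).map String.ofList).reverse) := by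
    rw [extract_surname_from_appellation_alt, pv_scan_eq_F, pv_split0_reverse,
      ← List.map_reverse, pv_F_map, List.map_reverse]
  by_cases hs : s = ""
  · subst hs
    rw [hB]
    rfl
  · rw [extract_surname_from_appellation]
    rw [if_neg hs]
    have hsplit : PySem.Str.split₀ (PySem.Str.strip s)
        = (PySem.Chars.split₀ s.toList).map String.ofList := by
      rw [PySem.Str.split₀, PySem.Str.strip, String.toList_ofList, pv_split0_strip]
    simp only [hsplit]
    rw [pv_core, hB]
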